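-- pv_equiv track=rewrite | github.com/wwwwodddd/Zukunft | leetcode/maximum-number-of-non-overlapping-subarrays-with-sum-equals-target.py | maxNonOverlapping
-- ===== SOURCE A (Python) =====
-- from typing import List
--
-- def maxNonOverlapping(a: List[int], t: int) -> int:
--     g = {0}
--     s = 0
--     c = 0
--     for i in a:
--         s += i
--         if s - t in g:
--             g = {0}
--             s = 0
--             c += 1
--         else:
--             g.add(s)
--     return c
-- ===== SOURCE B (Python) =====
-- from typing import List
--
-- def maxNonOverlapping(a: List[int], t: int) -> int:
--     # Stage 1: materialize the prefix sums.
--     prefixes = []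
--     p = 0
--     for x in a:
--         p += x
--         prefixes.append(p)
--     # Stage 2: DP over prefix sums: best[q] = max count achievable with a
--     # subarray boundary at prefix sum q (never reset, unlike A's set).
--     best = {0: 0}
--     ans = 0
--     for p in prefixes:
--         v = best.get(p - t)
--         if v is not None and v + 1 > ans:
--             ans = v + 1
--         best[p] = ans
--     return ans
-- ===== Notes on version B (the rewrite author's own statement) =====
-- stated objective: alternative
-- what changed: Replaces A's single greedy scan that resets a set of prefix sums after each found subarray with a two-stage prefix-sum dynamic program: first materialize all prefix sums, then fold a never-reset dict mapping each prefix sum to the best count achievable at that boundary.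
import Mathlib
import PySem

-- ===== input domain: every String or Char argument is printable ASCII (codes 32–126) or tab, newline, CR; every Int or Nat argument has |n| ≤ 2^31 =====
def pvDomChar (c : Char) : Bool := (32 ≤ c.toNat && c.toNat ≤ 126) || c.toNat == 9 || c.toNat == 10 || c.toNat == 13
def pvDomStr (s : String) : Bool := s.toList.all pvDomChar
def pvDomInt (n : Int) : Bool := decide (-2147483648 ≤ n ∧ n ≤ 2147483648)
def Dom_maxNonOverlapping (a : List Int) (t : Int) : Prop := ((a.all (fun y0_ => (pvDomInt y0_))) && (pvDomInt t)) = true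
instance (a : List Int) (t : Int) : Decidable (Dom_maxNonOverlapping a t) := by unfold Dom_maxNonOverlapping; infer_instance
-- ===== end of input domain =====

-- B replaces A's greedy set-with-reset by a two-stage prefix-sum dynamic program over a
-- never-reset dict of best counts (alternative algorithm, same O(n) cost).

-- ===== PORT A =====
-- A's loop state: (g, s, c) = (set of prefix sums since last reset, running sum, count)
def stepA (t : Int) (st : PySem.Set Int × Int × Int) (i : Int) : PySem.Set Int × Int × Int :=
  let g := st.1
  let s := st.2.1 + i
  let c := st.2.2
  if s - t ∈ g then (PySem.Set.ofList [0], 0, c + 1)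
  else (PySem.Set.add g s, s, c)

def maxNonOverlapping (a : List Int) (t : Int) : Int :=
  (a.foldl (stepA t) (PySem.Set.ofList [0], 0, 0)).2.2

-- ===== PORT B =====
-- Stage 1 of Source B: the list of prefix sums (p is the running prefix).
def prefixSums (p : Int) : List Int → List Int
  | [] => []
  | x :: xs => (p + x) :: prefixSums (p + x) xs

-- Stage 2 of Source B: recursion over the prefix list with the dict `best` and running `ans`.
def loopB (t : Int) (best : PySem.Dict Int Int) (ans : Int) : List Int → Int
  | [] => ans
  | p :: ps =>
    let ans' :=
      match best.get? (p - t) with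
      | some v => if v + 1 > ans then v + 1 else ans
      | none => ans
    loopB t (best.insert p ans') ans' ps

def maxNonOverlapping_alt (a : List Int) (t : Int) : Int :=
  loopB t (PySem.Dict.ofList [(0, 0)]) 0 (prefixSums 0 a)

-- ===== PRECONDITION & SPEC =====
def Spec_maxNonOverlapping (a : List Int) (t : Int) (out : Int) : Prop := out = maxNonOverlapping_alt a t
instance (a : List Int) (t : Int) (out : Int) : Decidable (Spec_maxNonOverlapping a t out) := by unfold Spec_maxNonOverlapping; infer_instance

-- ===== CLAIM (what is proved, stated in full; the proofs are below) =====
def Claim_equal_maxNonOverlapping : Prop := ∀ (a : List Int) (t : Int), Dom_maxNonOverlapping a t → Spec_maxNonOverlapping a t (maxNonOverlapping a t)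

-- ===== LEMMAS AND PROOFS =====

-- Simulation invariant between A's state (g, s, c) and B's state (best, ans), where b is the
-- absolute prefix sum at A's last reset (so the current absolute prefix is b + s): counts agree,
-- the keys of best carrying the current count c are exactly the shifted members of g, and all
-- stored counts are ≤ c.
def InvAB (b : Int) (g : PySem.Set Int) (s c : Int) (best : PySem.Dict Int Int) (ans : Int) : Prop :=
  ans = c ∧
  (∀ q : Int, q ∈ g ↔ best.get? (b + q) = some c) ∧
  (∀ k v : Int, best.get? k = some v → v ≤ c)

lemma fold_eq (t : Int) : ∀ (l : List Int) (b : Int) (g : PySem.Set Int) (s c : Int)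
    (best : PySem.Dict Int Int) (ans : Int), InvAB b g s c best ans →
    (l.foldl (stepA t) (g, s, c)).2.2 = loopB t best ans (prefixSums (b + s) l) := by
  intro l
  induction l with
  | nil => intro b g s c best ans h; exact h.1.symm ▸ rfl
  | cons x xs ih =>
    intro b g s c best ans h
    obtain ⟨hac, hmem, hbd⟩ := h
    simp only [List.foldl_cons, prefixSums, loopB]
    by_cases hin : s + x - t ∈ g
    · -- A resets; B's lookup finds value c and ans becomes c + 1
      have hget : best.get? (b + s + x - t) = some c := by
        have hm := (hmem (s + x - t)).mp hin
        have he : b + (s + x - t) = b + s + x - t := by omega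
        rwa [he] at hm
      have hstep : stepA t (g, s, c) x = (PySem.Set.ofList [0], 0, c + 1) := by
        simp [stepA, hin]
      rw [hstep, hget]
      have hgt : c + 1 > ans := by omega
      simp only [hgt, if_pos]
      have := ih (b + s + x) (PySem.Set.ofList [0]) 0 (c + 1)
        (best.insert (b + s + x) (c + 1)) (c + 1) ?_
      · have he : b + s + x + 0 = b + s + x := by omega
        rwa [he] at this
      · refine ⟨rfl, ?_, ?_⟩
        · intro q
          rw [PySem.Dict.get?_insert]
          by_cases hq : q = 0
          · have he : b + s + x + q = b + s + x := by omega
            simp [hq, he, PySem.Set.mem_ofList]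
          · have hne : b + s + x + q ≠ b + s + x := by omega
            rw [if_neg hne]
            constructor
            · intro hq'; exact absurd (by simpa [PySem.Set.mem_ofList] using hq') hq
            · intro hq'; have := hbd _ _ hq'; omega
        · intro k v hkv
          rw [PySem.Dict.get?_insert] at hkv
          split_ifs at hkv with he
          · injection hkv with h'; omega
          · have := hbd _ _ hkv; omega
    · -- A keeps going; B's lookup (if any) finds a value < c, so ans stays c
      have hne : best.get? (b + s + x - t) ≠ some c := by
        intro hcon
        apply hin
        have he : b + s + x - t = b + (s + x - t) := by omega
        rw [he] at hcon
        exact (hmem (s + x - t)).mpr hcon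
      have hstep : stepA t (g, s, c) x = (PySem.Set.add g (s + x), s + x, c) := by
        simp [stepA, hin]
      rw [hstep]
      have hans : (match best.get? (b + s + x - t) with
          | some v => if v + 1 > ans then v + 1 else ans
          | none => ans) = ans := by
        cases hv : best.get? (b + s + x - t) with
        | none => rfl
        | some v =>
          have hvle := hbd _ _ hv
          have hvne : v ≠ c := by intro h'; exact hne (h' ▸ hv)
          have hngt : ¬ v + 1 > ans := by omega
          simp [hngt]
      rw [hans]
      have := ih b (PySem.Set.add g (s + x)) (s + x) c
        (best.insert (b + s + x) ans) ans ?_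
      · have he : b + (s + x) = b + s + x := by omega
        rwa [he] at this
      · refine ⟨hac, ?_, ?_⟩
        · intro q
          rw [PySem.Dict.get?_insert, PySem.Set.mem_add]
          by_cases hq : q = s + x
          · have he : b + q = b + s + x := by omega
            rw [if_pos he]
            simp [hq, hac]
          · have he : b + q ≠ b + s + x := by omega
            rw [if_neg he]
            constructor
            · rintro (h' | h')
              · exact (hmem q).mp h'
              · exact absurd h' hq
            · intro h'; exact Or.inl ((hmem q).mpr h')
        · intro k v hkv
          rw [PySem.Dict.get?_insert] at hkv
          split_ifs at hkv with he
          · injection hkv with h'; omega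
          · exact hbd _ _ hkv

lemma InvAB_init : InvAB 0 (PySem.Set.ofList [0]) 0 0 (PySem.Dict.ofList [(0, 0)]) 0 := by
  have hof : PySem.Dict.ofList [((0 : Int), (0 : Int))] = PySem.Dict.empty.insert 0 0 := rfl
  refine ⟨rfl, ?_, ?_⟩
  · intro q
    rw [hof, PySem.Dict.get?_insert]
    by_cases hq : q = 0
    · simp [hq, PySem.Set.mem_ofList]
    · have hne : 0 + q ≠ (0 : Int) := by omega
      rw [if_neg hne, PySem.Dict.get?_empty]
      simp [PySem.Set.mem_ofList, hq]
  · intro k v hkv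
    rw [hof, PySem.Dict.get?_insert] at hkv
    split_ifs at hkv with hk
    · injection hkv with h'; omega
    · rw [PySem.Dict.get?_empty] at hkv; cases hkv

-- ===== VERDICT (by name: the statement is the Claim_ definition above) =====
theorem maxNonOverlapping_spec : Claim_equal_maxNonOverlapping := by
  intro a t _
  unfold Spec_maxNonOverlapping maxNonOverlapping maxNonOverlapping_alt
  have := fold_eq t a 0 (PySem.Set.ofList [0]) 0 0 (PySem.Dict.ofList [(0, 0)]) 0 InvAB_init
  simpa using this
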